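-- pv_equiv track=rewrite | github.com/Ektomorf/report_generator | test_report_generator.py | _get_all_unique_keys
-- ===== SOURCE A (Python) =====
-- from typing import Dict, List, Any, Optional
--
-- def _get_all_unique_keys(results_data: List[Dict]) -> List[str]:
--     """Get all unique keys from the results data in a consistent order"""
--     if not results_data:
--         return []
--
--     # Collect all unique keys
--     all_keys = set()
--     for entry in results_data:
--         all_keys.update(entry.keys())
--
--     # Remove docstring-related fields as they should be in the description section, not table columns
--     docstring_fields = {'docstring', 'test_description', 'description', 'Docstring', 'Test_Description', 'Description'}
--     all_keys = all_keys - docstring_fields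
--
--     # Define a preferred order for common keys
--     key_order = [
--         'Timestamp',
--         # Channel-related keys (dynamic - can be enabled_0, enabled_1, etc.)
--         'channel', 'frequency', 'enabled', 'gain',  # Base names
--         'spectrum_frequencies',
--         'spectrum_amplitudes',
--         'peak_frequency',
--         'peak_amplitude',
--         'screenshot_filepath',
--         # SOCAN-related keys
--         'socan_command_method',
--         'socan_command_args',
--         'socan_command',
--         'parsed_socan_response',
--         'raw_socan_response',
--         # RF Matrix-related keys
--         'rf_matrix_command_method',
--         'rf_matrix_command_args',
--         'rf_matrix_command',
--         'parsed_rf_matrix_response',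
--         'raw_rf_matrix_response',
--         # Keysight-related keys
--         'keysight_xsan_command_method',
--         'keysight_xsan_command_args',
--         'keysight_xsan_command',
--         # Measurement data
--         'frequencies',
--         'amplitudes',
--     ]
--
--     # Sort keys: preferred order first, then alphabetically for others
--     ordered_keys = []
--     remaining_keys = set(all_keys)
--
--     # Add keys in preferred order if they exist
--     for key in key_order:
--         if key in remaining_keys:
--             ordered_keys.append(key)
--             remaining_keys.remove(key)
--
--     # Add channel-specific keys (enabled_0, frequency_1, etc.) in order
--     channel_keys = [k for k in remaining_keys if any(k.startswith(base) for base in ['enabled_', 'frequency_', 'gain_'])]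
--     for key in sorted(channel_keys):
--         ordered_keys.append(key)
--         remaining_keys.remove(key)
--
--     # Add any remaining keys alphabetically
--     ordered_keys.extend(sorted(remaining_keys))
--
--     return ordered_keys
-- ===== SOURCE B (Python) =====
-- from typing import Dict, List
--
-- def _get_all_unique_keys(results_data: List[Dict]) -> List[str]:
--     """Get all unique keys from the results data in a consistent order"""
--     if not results_data:
--         return []
--
--     docstring_fields = {'docstring', 'test_description', 'description',
--                         'Docstring', 'Test_Description', 'Description'}
--     keys = {k for entry in results_data for k in entry if k not in docstring_fields}
--
--     key_order = [
--         'Timestamp',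
--         'channel', 'frequency', 'enabled', 'gain',
--         'spectrum_frequencies',
--         'spectrum_amplitudes',
--         'peak_frequency',
--         'peak_amplitude',
--         'screenshot_filepath',
--         'socan_command_method',
--         'socan_command_args',
--         'socan_command',
--         'parsed_socan_response',
--         'raw_socan_response',
--         'rf_matrix_command_method',
--         'rf_matrix_command_args',
--         'rf_matrix_command',
--         'parsed_rf_matrix_response',
--         'raw_rf_matrix_response',
--         'keysight_xsan_command_method',
--         'keysight_xsan_command_args',
--         'keysight_xsan_command',
--         'frequencies',
--         'amplitudes',
--     ]
--     index = {k: i for i, k in enumerate(key_order)}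
--     n = len(key_order)
--
--     def rank(k):
--         if k in index:
--             return (index[k], '')
--         if k.startswith(('enabled_', 'frequency_', 'gain_')):
--             return (n, k)
--         return (n + 1, k)
--
--     return sorted(keys, key=rank)
-- ===== Notes on version B (the rewrite author's own statement) =====
-- stated objective: simpler
-- what changed: A builds the result in three sequential phases (scan the preferred key_order list against a shrinking remaining-set, then a channel-prefix pass with its own sort, then a final sort of the leftovers); B assigns every surviving key a single rank tuple ((position,'') for preferred keys, (n,k) for channel-prefixed keys, (n+1,k) otherwise) and produces the whole result with one sorted() call.
import Mathlib
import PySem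

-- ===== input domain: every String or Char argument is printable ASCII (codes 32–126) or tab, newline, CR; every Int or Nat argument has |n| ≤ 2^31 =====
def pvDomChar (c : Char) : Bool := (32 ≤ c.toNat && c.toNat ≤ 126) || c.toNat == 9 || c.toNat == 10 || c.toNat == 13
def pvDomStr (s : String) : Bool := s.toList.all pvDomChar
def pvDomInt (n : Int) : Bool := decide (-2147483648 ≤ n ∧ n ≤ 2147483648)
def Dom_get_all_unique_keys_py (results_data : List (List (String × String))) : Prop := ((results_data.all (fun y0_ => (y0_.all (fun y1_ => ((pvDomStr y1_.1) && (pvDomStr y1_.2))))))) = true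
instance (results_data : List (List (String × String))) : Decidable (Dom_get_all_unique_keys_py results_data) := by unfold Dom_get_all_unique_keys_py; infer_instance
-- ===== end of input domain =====

-- B replaces A's three-stage output construction (preferred-order scan, channel-key pass, leftover pass)
-- by one sorted() call with a rank key; equivalence of return values is proved (neither mutates its input).
-- String comparison is done on .toList (code-point order, exactly Python's str '<').

-- shared literal constants of both Python versions
def pvDocFields : List String :=
  ["docstring", "test_description", "description", "Docstring", "Test_Description", "Description"]

def pvKeyOrder : List String :=
  ["Timestamp",
   "channel", "frequency", "enabled", "gain",
   "spectrum_frequencies",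
   "spectrum_amplitudes",
   "peak_frequency",
   "peak_amplitude",
   "screenshot_filepath",
   "socan_command_method",
   "socan_command_args",
   "socan_command",
   "parsed_socan_response",
   "raw_socan_response",
   "rf_matrix_command_method",
   "rf_matrix_command_args",
   "rf_matrix_command",
   "parsed_rf_matrix_response",
   "raw_rf_matrix_response",
   "keysight_xsan_command_method",
   "keysight_xsan_command_args",
   "keysight_xsan_command",
   "frequencies",
   "amplitudes"]

def pvChanBases : List String := ["enabled_", "frequency_", "gain_"]

-- ===== PORT A =====
def get_all_unique_keys_py (results_data : List (List (String × String))) : List String :=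
  if results_data = [] then []
  else
    -- all_keys = set(); for entry: all_keys.update(entry.keys())
    let all_keys0 : PySem.Set String :=
      results_data.foldl (fun s entry => PySem.Set.update s (PySem.Dict.keys ⟨entry⟩)) PySem.Set.empty
    -- all_keys = all_keys - docstring_fields
    let all_keys : PySem.Set String := PySem.Set.diff all_keys0 (PySem.Set.ofList pvDocFields)
    -- ordered_keys = []; remaining_keys = set(all_keys); for key in key_order: …
    let p1 : List String × PySem.Set String :=
      pvKeyOrder.foldl
        (fun p key =>
          if PySem.Set.contains p.2 key then (p.1 ++ [key], PySem.Set.discard p.2 key) else p)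
        ([], all_keys)
    -- channel_keys = [k for k in remaining_keys if any(k.startswith(base) …)]
    let channel_keys : List String :=
      p1.2.filter (fun k => pvChanBases.any (fun b => PySem.Str.startswith k b))
    -- for key in sorted(channel_keys): append; remove
    let p2 : List String × PySem.Set String :=
      (PySem.List.sorted channel_keys (fun x => x.toList) false).foldl
        (fun p key => (p.1 ++ [key], PySem.Set.discard p.2 key)) p1
    -- ordered_keys.extend(sorted(remaining_keys))
    p2.1 ++ PySem.List.sorted p2.2 (fun x => x.toList) false

-- ===== PORT B =====
-- index = {k: i for i, k in enumerate(key_order)}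
def pvIndexB : PySem.Dict String Int :=
  (PySem.List.enumerate pvKeyOrder).foldl (fun d p => PySem.Dict.insert d p.2 p.1) ⟨[]⟩

-- rank(k): (index[k], '') if preferred, (n, k) if channel-prefixed, (n+1, k)  — a Python tuple
-- compared lexicographically, hence the Lex (Int × List Char) key type
def pvRankB (k : String) : Lex (Int × List Char) :=
  match PySem.Dict.get? pvIndexB k with
  | some i => toLex (i, ("" : String).toList)
  | none =>
    if pvChanBases.any (fun b => PySem.Str.startswith k b) then
      toLex ((pvKeyOrder.length : Int), k.toList)
    else
      toLex ((pvKeyOrder.length : Int) + 1, k.toList)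

def get_all_unique_keys_py_alt (results_data : List (List (String × String))) : List String :=
  if results_data = [] then []
  else
    -- keys = {k for entry in results_data for k in entry if k not in docstring_fields}
    let keys : PySem.Set String :=
      PySem.Set.ofList
        ((results_data.flatMap (fun entry => PySem.Dict.keys ⟨entry⟩)).filter
          (fun k => !(PySem.Set.ofList pvDocFields).contains k))
    -- return sorted(keys, key=rank)
    PySem.List.sorted keys pvRankB false

-- ===== PRECONDITION & SPEC =====
def Spec_get_all_unique_keys_py (results_data : List (List (String × String))) (out : List String) : Prop := out = get_all_unique_keys_py_alt results_data
instance (results_data : List (List (String × String))) (out : List String) : Decidable (Spec_get_all_unique_keys_py results_data out) := by unfold Spec_get_all_unique_keys_py; infer_instance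

-- ===== CLAIM (what is proved, stated in full; the proofs are below) =====
def Claim_equal_get_all_unique_keys_py : Prop := ∀ (results_data : List (List (String × String))), Dom_get_all_unique_keys_py results_data → Spec_get_all_unique_keys_py results_data (get_all_unique_keys_py results_data)

-- ===== LEMMAS AND PROOFS =====

-- the channel-prefix test, as used by both ports
def pvIsChan (k : String) : Bool := pvChanBases.any (fun b => PySem.Str.startswith k b)

-- the list of all keys occurring in the data, in order, with multiplicity
def pvFlat (rd : List (List (String × String))) : List String :=
  rd.flatMap (fun entry => PySem.Dict.keys ⟨entry⟩)

-- A's accumulation of entry key sets is one big set-of-list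
theorem pvUpdate_foldl (f : List (String × String) → List String)
    (rd : List (List (String × String))) : ∀ s : PySem.Set String,
    rd.foldl (fun s entry => PySem.Set.update s (f entry)) s
      = PySem.Set.update s (rd.flatMap f) := by
  induction rd with
  | nil => intro s; simp [PySem.Set.update]
  | cons a t ih =>
    intro s
    rw [List.foldl_cons, ih (PySem.Set.update s (f a))]
    simp [PySem.Set.update, List.foldl_append]

theorem pvA_allkeys (rd : List (List (String × String))) :
    rd.foldl (fun s entry => PySem.Set.update s (PySem.Dict.keys ⟨entry⟩)) PySem.Set.empty
      = PySem.Set.ofList (pvFlat rd) := by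
  rw [pvUpdate_foldl (fun entry => PySem.Dict.keys ⟨entry⟩) rd PySem.Set.empty]
  rfl

-- stage-1 fold of A: append the preferred keys present, remove them from the remaining set
theorem pvStage1 (ko : List String) (hko : ko.Nodup) (acc rem : List String) :
    ko.foldl
      (fun (p : List String × PySem.Set String) key =>
        if PySem.Set.contains p.2 key then (p.1 ++ [key], PySem.Set.discard p.2 key) else p)
      (acc, rem)
      = (acc ++ ko.filter (fun k => rem.contains k), rem.filter (fun k => !ko.contains k)) := by
  induction ko generalizing acc rem with
  | nil => simp
  | cons a t ih =>
    have hat : a ∉ t := (List.nodup_cons.mp hko).1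
    have ht : t.Nodup := (List.nodup_cons.mp hko).2
    rw [List.foldl_cons]
    by_cases h : rem.contains a
    · rw [if_pos (by exact h)]
      rw [ih ht (acc ++ [a]) (PySem.Set.discard rem a)]
      refine Prod.ext ?_ ?_
      · show acc ++ [a] ++ _ = acc ++ List.filter _ (a :: t)
        rw [List.filter_cons_of_pos (by exact h), List.append_assoc]
        congr 1
        show [a] ++ _ = [a] ++ _
        congr 1
        apply List.filter_congr
        intro x hx
        show List.contains (List.filter _ rem) x = rem.contains x
        have hxa : x ≠ a := fun e => hat (e ▸ hx)
        simp [List.contains_eq_mem, List.mem_filter, hxa]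
      · show List.filter _ (List.filter _ rem) = _
        rw [List.filter_filter]
        apply List.filter_congr
        intro x hx
        simp [List.contains_eq_mem, Bool.and_comm, beq_eq_decide]
    · rw [if_neg (by simpa using h)]
      rw [ih ht acc rem]
      have ha : a ∉ rem := by simpa [List.contains_eq_mem] using h
      refine Prod.ext ?_ ?_
      · show _ = acc ++ List.filter _ (a :: t)
        rw [List.filter_cons_of_neg (by exact h)]
      · apply List.filter_congr
        intro x hx
        have hxa : x ≠ a := fun e => ha (e ▸ hx)
        simp [List.contains_eq_mem, hxa]

-- stage-2 fold of A: append all of xs, remove them from the remaining set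
theorem pvStage2 (xs : List String) (acc rem : List String) :
    xs.foldl
      (fun (p : List String × PySem.Set String) key => (p.1 ++ [key], PySem.Set.discard p.2 key))
      (acc, rem)
      = (acc ++ xs, rem.filter (fun k => !xs.contains k)) := by
  induction xs generalizing acc rem with
  | nil => simp
  | cons a t ih =>
    rw [List.foldl_cons]
    show List.foldl _ (acc ++ [a], PySem.Set.discard rem a) t = _
    rw [ih]
    refine Prod.ext ?_ ?_
    · simp
    · show List.filter _ (List.filter _ rem) = _
      rw [List.filter_filter]
      apply List.filter_congr
      intro x hx
      simp [List.contains_eq_mem, Bool.not_or, Bool.and_comm, beq_eq_decide]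

-- the rank of a preferred key is its key_order position, paired with the empty string
theorem pvRank_mem : ∀ k ∈ pvKeyOrder,
    pvRankB k = toLex ((pvKeyOrder.idxOf k : Int), []) ∧ pvKeyOrder.idxOf k < 25 := by
  decide

-- the rank of a non-preferred key
theorem pvRank_not_mem (k : String) (hk : k ∉ pvKeyOrder) :
    pvRankB k = if pvIsChan k then toLex ((25 : Int), k.toList) else toLex ((26 : Int), k.toList) := by
  have hkeys : pvIndexB.items.map Prod.fst = pvKeyOrder := by decide
  have hfind : List.find? (fun p => p.1 == k) pvIndexB.items = none := by
    rw [List.find?_eq_none]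
    intro x hx
    have hxm : x.1 ∈ pvKeyOrder := hkeys ▸ List.mem_map_of_mem hx
    simp only [beq_iff_eq]
    exact fun e => hk (e ▸ hxm)
  unfold pvRankB
  rw [show PySem.Dict.get? pvIndexB k = none from by
    simp only [PySem.Dict.get?, hfind, Option.map_none]]
  show (if pvChanBases.any (fun b => PySem.Str.startswith k b) then _ else _) = _
  unfold pvIsChan
  have h25 : (pvKeyOrder.length : Int) = 25 := by decide
  split
  · rw [h25]
  · rw [h25]; norm_num

-- the doc-field literal set is already duplicate-free
theorem pvDoc_ofList : PySem.Set.ofList pvDocFields = pvDocFields := by decide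

-- the surviving key set, A's way and B's way
def pvKA (rd : List (List (String × String))) : List String :=
  PySem.Set.diff (PySem.Set.ofList (pvFlat rd)) (PySem.Set.ofList pvDocFields)
def pvKB (rd : List (List (String × String))) : List String :=
  PySem.Set.ofList ((pvFlat rd).filter (fun k => !(PySem.Set.ofList pvDocFields).contains k))

theorem pvKA_mem (rd : List (List (String × String))) (x : String) :
    x ∈ pvKA rd ↔ x ∈ pvFlat rd ∧ x ∉ pvDocFields := by
  unfold pvKA
  rw [pvDoc_ofList]
  simp [PySem.Set.diff, List.mem_filter, PySem.Set.mem_ofList, PySem.Set.contains,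
    List.contains_eq_mem]

theorem pvKB_mem (rd : List (List (String × String))) (x : String) :
    x ∈ pvKB rd ↔ x ∈ pvFlat rd ∧ x ∉ pvDocFields := by
  unfold pvKB
  rw [pvDoc_ofList]
  simp [PySem.Set.mem_ofList, List.mem_filter, PySem.Set.contains, List.contains_eq_mem]

theorem pvKA_nodup (rd : List (List (String × String))) : (pvKA rd).Nodup :=
  List.Nodup.filter _ (PySem.Set.nodup_ofList _)

theorem pvKB_nodup (rd : List (List (String × String))) : (pvKB rd).Nodup :=
  PySem.Set.nodup_ofList _

-- proof-side names for A's intermediate lists, parametric in the surviving key set K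
def pvRem1 (K : List String) : List String := K.filter (fun k => !pvKeyOrder.contains k)
def pvChan (K : List String) : List String :=
  (pvRem1 K).filter (fun k => pvChanBases.any (fun b => PySem.Str.startswith k b))
def pvSC (K : List String) : List String :=
  @PySem.List.sorted String (List Char) List.instLinearOrder.toLT LinearOrder.toDecidableLT
    (pvChan K) (fun x => x.toList) false

-- the value of sorted does not depend on which Decidable instance decides the order
theorem pvSortIrrel (xs : List String) :
    PySem.List.sorted xs (fun x => x.toList) false
      = @PySem.List.sorted String (List Char) List.instLinearOrder.toLT LinearOrder.toDecidableLT
          xs (fun x => x.toList) false := by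
  congr 1
def pvRem2 (K : List String) : List String :=
  (pvRem1 K).filter (fun k => !(pvSC K).contains k)

theorem pvRank_chan (x : String) (h1 : x ∉ pvKeyOrder) (h2 : pvIsChan x = true) :
    pvRankB x = toLex ((25 : Int), x.toList) := by rw [pvRank_not_mem x h1, if_pos h2]

theorem pvRank_rest (x : String) (h1 : x ∉ pvKeyOrder) (h2 : pvIsChan x = false) :
    pvRankB x = toLex ((26 : Int), x.toList) := by rw [pvRank_not_mem x h1, if_neg (by simp [h2])]

theorem pvCore (K KB : List String) (hKn : K.Nodup) (hKBn : KB.Nodup)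
    (hmem : ∀ x, x ∈ K ↔ x ∈ KB) :
    (([] : List String) ++ pvKeyOrder.filter (fun k => K.contains k)) ++ pvSC K
      ++ @PySem.List.sorted String (List Char) List.instLinearOrder.toLT LinearOrder.toDecidableLT (pvRem2 K) (fun x => x.toList) false
      = PySem.List.sorted KB pvRankB false := by
  have hr1n : (pvRem1 K).Nodup := List.Nodup.filter _ hKn
  have hchn : (pvChan K).Nodup := List.Nodup.filter _ hr1n
  have hscperm : (pvSC K).Perm (pvChan K) :=
    @PySem.List.sorted_perm String (List Char) List.instLinearOrder.toLT
      LinearOrder.toDecidableLT (pvChan K) (fun x => x.toList) false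
  have hscn : (pvSC K).Nodup := hscperm.nodup_iff.mpr hchn
  have hscmem : ∀ x, x ∈ pvSC K ↔ x ∈ pvChan K := fun x => hscperm.mem_iff
  have hr1mem : ∀ x, x ∈ pvRem1 K ↔ x ∈ K ∧ x ∉ pvKeyOrder := by
    intro x; simp [pvRem1, List.mem_filter, List.contains_eq_mem]
  have hchmem : ∀ x, x ∈ pvChan K ↔ (x ∈ K ∧ x ∉ pvKeyOrder) ∧ pvIsChan x = true := by
    intro x; rw [pvChan, List.mem_filter, hr1mem]; rfl
  have hrem2 : pvRem2 K = (pvRem1 K).filter (fun k => !pvIsChan k) := by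
    unfold pvRem2
    apply List.filter_congr
    intro x hx
    have : (pvSC K).contains x = pvIsChan x := by
      rw [List.contains_eq_mem]
      by_cases hc : pvIsChan x
      · simp [hc, hscmem, hchmem]
        exact (hr1mem x).mp hx
      · simp [hscmem, hchmem, hc]
    rw [this]
  have hordmem : ∀ x, x ∈ pvKeyOrder.filter (fun k => K.contains k) ↔ x ∈ pvKeyOrder ∧ x ∈ K := by
    intro x; simp [List.mem_filter, List.contains_eq_mem]
  have hrestperm : (@PySem.List.sorted String (List Char) List.instLinearOrder.toLT LinearOrder.toDecidableLT (pvRem2 K) (fun x => x.toList) false).Perm (pvRem2 K) :=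
    @PySem.List.sorted_perm String (List Char) List.instLinearOrder.toLT
      LinearOrder.toDecidableLT (pvRem2 K) (fun x => x.toList) false
  have hrestmem : ∀ x, x ∈ @PySem.List.sorted String (List Char) List.instLinearOrder.toLT LinearOrder.toDecidableLT (pvRem2 K) (fun x => x.toList) false ↔
      (x ∈ K ∧ x ∉ pvKeyOrder) ∧ pvIsChan x = false := by
    intro x
    rw [hrestperm.mem_iff, hrem2, List.mem_filter, hr1mem]
    simp
  have hrestn : (@PySem.List.sorted String (List Char) List.instLinearOrder.toLT LinearOrder.toDecidableLT (pvRem2 K) (fun x => x.toList) false).Nodup :=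
    hrestperm.nodup_iff.mpr (List.Nodup.filter _ hr1n)
  have hordn : (pvKeyOrder.filter (fun k => K.contains k)).Nodup :=
    List.Nodup.filter _ (by decide)
  have hAn : ((([] : List String) ++ pvKeyOrder.filter (fun k => K.contains k)) ++ pvSC K
      ++ @PySem.List.sorted String (List Char) List.instLinearOrder.toLT LinearOrder.toDecidableLT (pvRem2 K) (fun x => x.toList) false).Nodup := by
    simp only [List.nil_append]
    rw [List.append_assoc, List.nodup_append]
    refine ⟨hordn, ?_, ?_⟩
    · rw [List.nodup_append]
      refine ⟨hscn, hrestn, ?_⟩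
      intro a ha b hb
      have hca := (hchmem a).mp ((hscmem a).mp ha)
      have hcb := (hrestmem b).mp hb
      intro e; subst e
      simp [hca.2] at hcb
    · intro a ha b hb
      have hao := (hordmem a).mp ha
      intro e; subst e
      rcases List.mem_append.mp hb with h | h
      · exact ((hchmem a).mp ((hscmem a).mp h)).1.2 hao.1
      · exact ((hrestmem a).mp h).1.2 hao.1
  have hperm : ((([] : List String) ++ pvKeyOrder.filter (fun k => K.contains k)) ++ pvSC K
      ++ @PySem.List.sorted String (List Char) List.instLinearOrder.toLT LinearOrder.toDecidableLT (pvRem2 K) (fun x => x.toList) false).Perm KB := by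
    rw [List.perm_ext_iff_of_nodup hAn hKBn]
    intro a
    rw [← hmem a]
    simp only [List.nil_append, List.mem_append, hordmem, hscmem, hchmem, hrestmem]
    by_cases hka : a ∈ pvKeyOrder <;> by_cases hpa : pvIsChan a <;>
      simp [hka, hpa]
  have hko : List.Pairwise (fun a b => pvRankB a < pvRankB b) pvKeyOrder := by decide
  have hpair : List.Pairwise (fun a b => pvRankB a < pvRankB b)
      ((([] : List String) ++ pvKeyOrder.filter (fun k => K.contains k)) ++ pvSC K
        ++ @PySem.List.sorted String (List Char) List.instLinearOrder.toLT LinearOrder.toDecidableLT (pvRem2 K) (fun x => x.toList) false) := by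
    simp only [List.nil_append]
    rw [List.append_assoc, List.pairwise_append]
    refine ⟨List.Pairwise.sublist List.filter_sublist hko, ?_, ?_⟩
    · rw [List.pairwise_append]
      refine ⟨?_, ?_, ?_⟩
      · have hle := PySem.List.sorted_pairwise (pvChan K) (fun x => x.toList)
        have hscn' : List.Pairwise (fun a b : String => a ≠ b) (pvSC K) := hscn
        refine List.Pairwise.imp_of_mem ?_ (hle.and hscn')
        intro a b ha hb hab
        have hca := (hchmem a).mp ((hscmem a).mp ha)
        have hcb := (hchmem b).mp ((hscmem b).mp hb)
        rw [pvRank_chan a hca.1.2 hca.2, pvRank_chan b hcb.1.2 hcb.2, Prod.Lex.toLex_lt_toLex]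
        exact Or.inr ⟨rfl, lt_of_le_of_ne hab.1 (fun e => hab.2 (String.toList_inj.mp e))⟩
      · have hle := PySem.List.sorted_pairwise (pvRem2 K) (fun x => x.toList)
        have hrestn' : List.Pairwise (fun a b : String => a ≠ b)
            (@PySem.List.sorted String (List Char) List.instLinearOrder.toLT LinearOrder.toDecidableLT (pvRem2 K) (fun x => x.toList) false) := hrestn
        refine List.Pairwise.imp_of_mem ?_ (hle.and hrestn')
        intro a b ha hb hab
        have hca := (hrestmem a).mp ha
        have hcb := (hrestmem b).mp hb
        rw [pvRank_rest a hca.1.2 hca.2, pvRank_rest b hcb.1.2 hcb.2, Prod.Lex.toLex_lt_toLex]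
        exact Or.inr ⟨rfl, lt_of_le_of_ne hab.1 (fun e => hab.2 (String.toList_inj.mp e))⟩
      · intro a ha b hb
        have hca := (hchmem a).mp ((hscmem a).mp ha)
        have hcb := (hrestmem b).mp hb
        rw [pvRank_chan a hca.1.2 hca.2, pvRank_rest b hcb.1.2 hcb.2, Prod.Lex.toLex_lt_toLex]
        exact Or.inl (by norm_num)
    · intro a ha b hb
      have hao := (hordmem a).mp ha
      obtain ⟨hrk, hidx⟩ := pvRank_mem a hao.1
      have hbf : pvRankB b = toLex ((25 : Int), b.toList) ∨
          pvRankB b = toLex ((26 : Int), b.toList) := by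
        rcases List.mem_append.mp hb with h | h
        · exact Or.inl (pvRank_chan b ((hchmem b).mp ((hscmem b).mp h)).1.2
            ((hchmem b).mp ((hscmem b).mp h)).2)
        · exact Or.inr (pvRank_rest b ((hrestmem b).mp h).1.2 ((hrestmem b).mp h).2)
      have h25 : (pvKeyOrder.idxOf a : Int) < 25 := by exact_mod_cast hidx
      rcases hbf with h | h <;> rw [hrk, h, Prod.Lex.toLex_lt_toLex] <;>
        exact Or.inl (by omega)
  exact (PySem.List.sorted_eq_of_perm_of_pairwise_lt KB _ pvRankB hperm hpair).symm

theorem pvMain (rd : List (List (String × String))) (hrd : rd ≠ []) :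
    get_all_unique_keys_py rd = get_all_unique_keys_py_alt rd := by
  unfold get_all_unique_keys_py get_all_unique_keys_py_alt
  rw [if_neg hrd, if_neg hrd]
  simp only [pvA_allkeys]
  rw [pvStage1 pvKeyOrder (by decide)]
  rw [pvStage2]
  simp only [pvSortIrrel]
  exact pvCore (pvKA rd) (pvKB rd) (pvKA_nodup rd) (pvKB_nodup rd)
    (fun x => (pvKA_mem rd x).trans (pvKB_mem rd x).symm)

-- ===== VERDICT (by name: the statement is the Claim_ definition above) =====
theorem get_all_unique_keys_py_spec : Claim_equal_get_all_unique_keys_py := by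
  intro rd _
  show get_all_unique_keys_py rd = get_all_unique_keys_py_alt rd
  by_cases hrd : rd = []
  · subst hrd; rfl
  · exact pvMain rd hrd
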